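-- pv_equiv track=rewrite | github.com/jerbarnes/direct_parsing_to_sent_graph | perin/utility/bert_tokenizer.py | reduce_bert_input
-- ===== SOURCE A (Python) =====
-- def reduce_bert_input(to_gather, to_scatter, bert_input, to_delete):
--     new_gather, new_scatter = [], []
--     offset = 0
--     for i in range(len(to_gather)):
--         if to_gather[i] - 1 in to_delete:
--             offset += 1
--         else:
--             new_gather.append(to_gather[i] - offset)
--             new_scatter.append(to_scatter[i])
--     bert_input = [w for i, w in enumerate(bert_input) if i - 1 not in to_delete]
--     return new_gather, new_scatter, bert_input
-- ===== SOURCE B (Python) =====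
-- def reduce_bert_input(to_gather, to_scatter, bert_input, to_delete):
--     dels = set(to_delete)
--     deleted = [g - 1 in dels for g in to_gather]
--     offset = [0]
--     for d in deleted:
--         offset.append(offset[-1] + (1 if d else 0))
--     new_gather = [to_gather[i] - offset[i] for i in range(len(to_gather)) if not deleted[i]]
--     new_scatter = [to_scatter[i] for i in range(len(to_gather)) if not deleted[i]]
--     new_bert = [w for i, w in enumerate(bert_input) if i - 1 not in dels]
--     return new_gather, new_scatter, new_bert
-- ===== Notes on version B (the rewrite author's own statement) =====
-- stated objective: alternative
-- what changed: Replaces A's single loop carrying a running offset by a separate deletion-flag table, an explicit exclusive prefix-sum offset table, and two filtering comprehensions that consume it, with to_delete turned into a set for membership tests.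
import Mathlib
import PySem

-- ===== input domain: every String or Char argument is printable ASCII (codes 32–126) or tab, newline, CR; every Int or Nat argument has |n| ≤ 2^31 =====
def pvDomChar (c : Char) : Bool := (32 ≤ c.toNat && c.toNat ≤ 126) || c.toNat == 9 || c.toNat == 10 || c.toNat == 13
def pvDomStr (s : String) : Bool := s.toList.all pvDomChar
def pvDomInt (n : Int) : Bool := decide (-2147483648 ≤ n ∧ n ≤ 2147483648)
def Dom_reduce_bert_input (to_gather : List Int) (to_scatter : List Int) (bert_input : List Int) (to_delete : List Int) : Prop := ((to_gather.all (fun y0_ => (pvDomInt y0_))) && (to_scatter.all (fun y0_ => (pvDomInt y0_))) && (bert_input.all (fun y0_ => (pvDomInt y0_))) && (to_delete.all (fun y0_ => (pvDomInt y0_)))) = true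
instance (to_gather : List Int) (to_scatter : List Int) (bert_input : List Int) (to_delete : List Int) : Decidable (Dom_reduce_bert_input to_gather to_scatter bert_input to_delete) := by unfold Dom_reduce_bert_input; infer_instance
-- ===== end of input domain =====

-- B replaces A's single loop with a running offset by a deletion-flag table, an explicit
-- prefix-sum offset table, and two filtering comprehensions over it (set membership instead
-- of list membership); return value only, no argument is mutated by either version.

-- ===== PORT A =====
def reduce_bert_input (to_gather : List Int) (to_scatter : List Int) (bert_input : List Int) (to_delete : List Int) : List Int × List Int × List Int :=
  -- for i in range(len(to_gather)): …  (to_scatter[i] is in range under Pre_, so pyGetD's default is never read)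
  let st := (PySem.List.pyRange 0 (to_gather.length : Int) 1).foldl
    (fun (acc : List Int × List Int × Int) i =>
      if PySem.List.pyGetD to_gather i 0 - 1 ∈ to_delete then
        (acc.1, acc.2.1, acc.2.2 + 1)
      else
        (acc.1 ++ [PySem.List.pyGetD to_gather i 0 - acc.2.2],
         acc.2.1 ++ [PySem.List.pyGetD to_scatter i 0], acc.2.2))
    ([], [], 0)
  let new_bert := (PySem.List.enumerate bert_input 0).filterMap
    (fun p => if p.1 - 1 ∈ to_delete then none else some p.2)
  (st.1, st.2.1, new_bert)

-- ===== PORT B =====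
def reduce_bert_input_alt (to_gather : List Int) (to_scatter : List Int) (bert_input : List Int) (to_delete : List Int) : List Int × List Int × List Int :=
  let dels : PySem.Set Int := PySem.Set.ofList to_delete
  let deleted : List Bool := to_gather.map (fun g => decide ((g - 1) ∈ dels))
  let offset : List Int := deleted.scanl (fun a d => a + (if d then (1:Int) else 0)) 0
  let new_gather := (List.range to_gather.length).filterMap
    (fun i => if deleted.getD i false then none else some (to_gather.getD i 0 - offset.getD i 0))
  let new_scatter := (List.range to_gather.length).filterMap
    (fun i => if deleted.getD i false then none else some (to_scatter.getD i 0))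
  let new_bert := (PySem.List.enumerate bert_input 0).filterMap
    (fun p => if (p.1 - 1) ∈ dels then none else some p.2)
  (new_gather, new_scatter, new_bert)

-- ===== PRECONDITION & SPEC =====
-- Pre_ excludes exactly the inputs where Python A raises IndexError: a kept (non-deleted)
-- position i of to_gather whose companion index is out of range in to_scatter.
def Pre_reduce_bert_input (to_gather : List Int) (to_scatter : List Int) (bert_input : List Int) (to_delete : List Int) : Prop :=
  ∀ i < to_gather.length, to_gather.getD i 0 - 1 ∈ to_delete ∨ i < to_scatter.length
instance (to_gather : List Int) (to_scatter : List Int) (bert_input : List Int) (to_delete : List Int) : Decidable (Pre_reduce_bert_input to_gather to_scatter bert_input to_delete) := by unfold Pre_reduce_bert_input; infer_instance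

def pvWitness_reduce_bert_input : List Int × List Int × List Int × List Int :=
  ([2, 3, 5], [10, 11, 12], [7, 8], [4])

def Spec_reduce_bert_input (to_gather : List Int) (to_scatter : List Int) (bert_input : List Int) (to_delete : List Int) (out : List Int × List Int × List Int) : Prop := out = reduce_bert_input_alt to_gather to_scatter bert_input to_delete
instance (to_gather : List Int) (to_scatter : List Int) (bert_input : List Int) (to_delete : List Int) (out : List Int × List Int × List Int) : Decidable (Spec_reduce_bert_input to_gather to_scatter bert_input to_delete out) := by unfold Spec_reduce_bert_input; infer_instance

-- ===== CLAIM (what is proved, stated in full; the proofs are below) =====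
def Claim_equal_reduce_bert_input : Prop := ∀ (to_gather : List Int) (to_scatter : List Int) (bert_input : List Int) (to_delete : List Int), Dom_reduce_bert_input to_gather to_scatter bert_input to_delete → Pre_reduce_bert_input to_gather to_scatter bert_input to_delete → Spec_reduce_bert_input to_gather to_scatter bert_input to_delete (reduce_bert_input to_gather to_scatter bert_input to_delete)

-- ===== LEMMAS AND PROOFS =====

-- the prefix-sum table read at index i is the count of deletion flags among the first i entries
lemma offset_getD (l : List Int) (p : Int → Bool) :
    ∀ (init : Int) (i : Nat), i ≤ l.length →
    ((l.map p).scanl (fun a d => a + (if d then (1:Int) else 0)) init).getD i 0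
      = init + ((l.take i).countP p : Int) := by
  induction l with
  | nil =>
      intro init i hi
      have : i = 0 := Nat.le_zero.mp hi
      subst this; simp
  | cons x xs ih =>
      intro init i hi
      cases i with
      | zero => simp
      | succ i =>
          rw [List.map_cons, List.scanl_cons, List.getD_cons_succ, List.take_succ_cons,
            List.countP_cons, ih _ i (by simpa using hi)]
          by_cases hx : p x <;> simp [hx] <;> ring

-- A's loop over the first n indices equals B's two filtered comprehensions plus the flag count
lemma loopA_eq (to_gather to_scatter to_delete : List Int) :
    ∀ n : Nat, n ≤ to_gather.length →
    (PySem.List.pyRange 0 (n : Int) 1).foldl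
      (fun (acc : List Int × List Int × Int) i =>
        if PySem.List.pyGetD to_gather i 0 - 1 ∈ to_delete then
          (acc.1, acc.2.1, acc.2.2 + 1)
        else
          (acc.1 ++ [PySem.List.pyGetD to_gather i 0 - acc.2.2],
           acc.2.1 ++ [PySem.List.pyGetD to_scatter i 0], acc.2.2))
      ([], [], 0)
    = ((List.range n).filterMap
         (fun i => if (to_gather.map (fun g => decide ((g - 1) ∈ PySem.Set.ofList to_delete))).getD i false then none
                   else some (to_gather.getD i 0 -
                     ((to_gather.map (fun g => decide ((g - 1) ∈ PySem.Set.ofList to_delete))).scanl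
                        (fun a d => a + (if d then (1:Int) else 0)) 0).getD i 0)),
       (List.range n).filterMap
         (fun i => if (to_gather.map (fun g => decide ((g - 1) ∈ PySem.Set.ofList to_delete))).getD i false then none
                   else some (to_scatter.getD i 0)),
       ((to_gather.take n).countP (fun g => decide (g - 1 ∈ to_delete)) : Int)) := by
  intro n
  induction n with
  | zero => intro _; simp [PySem.List.pyRange_one_eq_nil]
  | succ n ih =>
      intro hn
      have hn' : n < to_gather.length := hn
      have hrange : PySem.List.pyRange 0 ((n : Int) + 1) 1
          = PySem.List.pyRange 0 (n : Int) 1 ++ [(n : Int)] := by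
        simpa using PySem.List.pyRange_one_succ_right (a := 0) (b := (n : Int)) (by positivity)
      have hdel : (to_gather.map (fun g => decide ((g - 1) ∈ PySem.Set.ofList to_delete))).getD n false
          = decide (to_gather.getD n 0 - 1 ∈ to_delete) := by
        rw [List.getD_eq_getElem _ _ (by simpa using hn'), List.getD_eq_getElem _ _ hn']
        simp [PySem.Set.mem_ofList]
      have hoff : ((to_gather.map (fun g => decide ((g - 1) ∈ PySem.Set.ofList to_delete))).scanl
            (fun a d => a + (if d then (1:Int) else 0)) 0).getD n 0
          = ((to_gather.take n).countP (fun g => decide (g - 1 ∈ to_delete)) : Int) := by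
        rw [offset_getD to_gather _ 0 n (le_of_lt hn')]
        simp [PySem.Set.mem_ofList]
      have htake : to_gather.take (n + 1) = to_gather.take n ++ [to_gather[n]] := by
        rw [List.take_add_one, List.getElem?_eq_getElem hn']
        rfl
      have hgetD : to_gather.getD n 0 = to_gather[n] := List.getD_eq_getElem _ _ hn'
      push_cast
      rw [hrange, List.foldl_append, ih (le_of_lt hn'), List.range_succ,
        List.filterMap_append, List.filterMap_append, htake]
      simp only [List.foldl_cons, List.foldl_nil, List.filterMap_cons, List.filterMap_nil,
        List.countP_append, List.countP_cons, List.countP_nil, hdel, hoff,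
        PySem.List.pyGetD_natCast, hgetD]
      by_cases hc : to_gather[n] - 1 ∈ to_delete <;> simp [hc]

-- ===== VERDICT (by name: the statement is the Claim_ definition above) =====
theorem reduce_bert_input_spec : Claim_equal_reduce_bert_input := by
  intro to_gather to_scatter bert_input to_delete _ _
  unfold Spec_reduce_bert_input reduce_bert_input reduce_bert_input_alt
  have h := loopA_eq to_gather to_scatter to_delete to_gather.length le_rfl
  simp only [] at h ⊢
  rw [h]
  simp [PySem.Set.mem_ofList]
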